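-- pv_equiv track=rewrite | github.com/goyalgaurav64/Arrays | max-length-of-continuous-sequence-having-same-sum.py | contSeq
-- ===== SOURCE A (Python) =====
-- def contSeq(a,b,n):
--     res=0
--     for i in range(n):
--         s1=0
--         s2=0
--         for j in range(i,n):
--             s1+=a[j]
--             s2+=b[j]
--             if s1==s2:
--                 res=max(res,j-i+1)
--     return res
-- ===== SOURCE B (Python) =====
-- def contSeq(a, b, n):
--     # prefix-difference + first-occurrence hashmap: O(n) instead of O(n^2)
--     res = 0
--     diff = 0
--     first = {0: -1}
--     for i in range(n):
--         diff += a[i] - b[i]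
--         if diff in first:
--             res = max(res, i - first[diff])
--         else:
--             first[diff] = i
--     return res
-- ===== Notes on version B (the rewrite author's own statement) =====
-- stated objective: faster
-- what changed: replaces the O(n^2) double loop over all start indices by a single pass tracking the running prefix difference sum(a)-sum(b) with a hashmap of each difference value's first occurrence index, taking the max span to the first occurrence
import Mathlib
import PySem

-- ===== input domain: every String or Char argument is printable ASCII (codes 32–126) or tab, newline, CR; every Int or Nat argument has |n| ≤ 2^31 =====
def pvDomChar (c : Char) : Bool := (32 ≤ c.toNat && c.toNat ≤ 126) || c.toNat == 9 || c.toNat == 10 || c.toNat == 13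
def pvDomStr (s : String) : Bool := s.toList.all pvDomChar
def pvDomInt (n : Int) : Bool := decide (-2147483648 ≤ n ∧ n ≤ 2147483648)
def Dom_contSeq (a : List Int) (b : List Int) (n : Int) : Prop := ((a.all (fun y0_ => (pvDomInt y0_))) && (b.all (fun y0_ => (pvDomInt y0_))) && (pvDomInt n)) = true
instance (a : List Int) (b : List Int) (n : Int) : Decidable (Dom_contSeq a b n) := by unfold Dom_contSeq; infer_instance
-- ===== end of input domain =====

-- B replaces A's quadratic double loop by a single prefix-difference pass with a first-occurrence map; proved to return the same value.


-- ===== PORT A =====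
def contSeq (a : List Int) (b : List Int) (n : Int) : Int :=
  ((PySem.List.pyRange 0 n 1).foldl (fun res i =>
    ((PySem.List.pyRange i n 1).foldl
      (fun (st : Int × Int × Int) j =>
        let s1 := st.1 + PySem.List.pyGetD a j 0
        let s2 := st.2.1 + PySem.List.pyGetD b j 0
        (s1, s2, if s1 = s2 then max st.2.2 (j - i + 1) else st.2.2))
      (0, 0, res)).2.2) 0)

-- ===== PORT B =====
def contSeq_alt (a : List Int) (b : List Int) (n : Int) : Int :=
  ((PySem.List.pyRange 0 n 1).foldl
    (fun (st : Int × Int × PySem.Dict Int Int) i =>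
      let diff := st.2.1 + (PySem.List.pyGetD a i 0 - PySem.List.pyGetD b i 0)
      if st.2.2.contains diff then
        (max st.1 (i - st.2.2.getD diff 0), diff, st.2.2)
      else
        (st.1, diff, st.2.2.insert diff i))
    (0, 0, PySem.Dict.empty.insert 0 (-1))).1

-- ===== PRECONDITION & SPEC =====
-- Pre_ excludes exactly the inputs where Python A raises IndexError: n > len(a) or n > len(b) (the loops index a[j], b[j] for j < n).
def Pre_contSeq (a : List Int) (b : List Int) (n : Int) : Prop :=
  n ≤ (a.length : Int) ∧ n ≤ (b.length : Int)
instance (a : List Int) (b : List Int) (n : Int) : Decidable (Pre_contSeq a b n) := by unfold Pre_contSeq; infer_instance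
def pvWitness_contSeq : List Int × List Int × Int := ([1, 2, 0], [0, 3, 0], 3)

def Spec_contSeq (a : List Int) (b : List Int) (n : Int) (out : Int) : Prop := out = contSeq_alt a b n
instance (a : List Int) (b : List Int) (n : Int) (out : Int) : Decidable (Spec_contSeq a b n out) := by unfold Spec_contSeq; infer_instance

-- ===== CLAIM (what is proved, stated in full; the proofs are below) =====
def Claim_equal_contSeq : Prop := ∀ (a : List Int) (b : List Int) (n : Int), Dom_contSeq a b n → Pre_contSeq a b n → Spec_contSeq a b n (contSeq a b n)

-- ===== LEMMAS AND PROOFS =====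

def dd (a b : List Int) (k : Nat) : Int :=
  PySem.List.pyGetD a (k : Int) 0 - PySem.List.pyGetD b (k : Int) 0
def pc (a b : List Int) : Nat → Int
  | 0 => 0
  | k + 1 => pc a b k + dd a b k

lemma A_inner (a b : List Int) (i : Nat) : ∀ (L : Nat) (r : Int),
  (((List.range L).foldl (fun (st : Int × Int × Int) (u : Nat) =>
      let j : Int := (i : Int) + (u : Int)
      let s1 := st.1 + PySem.List.pyGetD a j 0
      let s2 := st.2.1 + PySem.List.pyGetD b j 0
      (s1, s2, if s1 = s2 then max st.2.2 (j - (i : Int) + 1) else st.2.2))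
    (0, 0, r))).2.2
    = (((List.range L).filter (fun u => decide (pc a b (i + u + 1) = pc a b i))).map
        (fun (u : Nat) => ((u : Int) + 1))).foldl max r
  ∧ (((List.range L).foldl (fun (st : Int × Int × Int) (u : Nat) =>
      let j : Int := (i : Int) + (u : Int)
      let s1 := st.1 + PySem.List.pyGetD a j 0
      let s2 := st.2.1 + PySem.List.pyGetD b j 0
      (s1, s2, if s1 = s2 then max st.2.2 (j - (i : Int) + 1) else st.2.2))
    (0, 0, r))).1
    - (((List.range L).foldl (fun (st : Int × Int × Int) (u : Nat) =>
      let j : Int := (i : Int) + (u : Int)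
      let s1 := st.1 + PySem.List.pyGetD a j 0
      let s2 := st.2.1 + PySem.List.pyGetD b j 0
      (s1, s2, if s1 = s2 then max st.2.2 (j - (i : Int) + 1) else st.2.2))
    (0, 0, r))).2.1
    = pc a b (i + L) - pc a b i := by
  intro L
  induction L with
  | zero => intro r; simp
  | succ L ih =>
    intro r
    obtain ⟨h1, h2⟩ := ih r
    simp only [List.range_succ, List.foldl_append, List.filter_append, List.map_append,
      List.foldl_cons, List.foldl_nil, List.filter_cons, List.filter_nil]
    set st := ((List.range L).foldl (fun (st : Int × Int × Int) (u : Nat) =>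
      let j : Int := (i : Int) + (u : Int)
      let s1 := st.1 + PySem.List.pyGetD a j 0
      let s2 := st.2.1 + PySem.List.pyGetD b j 0
      (s1, s2, if s1 = s2 then max st.2.2 (j - (i : Int) + 1) else st.2.2))
    (0, 0, r)) with hst
    have hdd : PySem.List.pyGetD a ((i : Int) + (L : Int)) 0
        - PySem.List.pyGetD b ((i : Int) + (L : Int)) 0 = dd a b (i + L) := by
      have hca : ((i : Int) + (L : Int)) = ((i + L : Nat) : Int) := by push_cast; ring
      rw [hca]; rfl
    have hpc : pc a b (i + L + 1) = pc a b (i + L) + dd a b (i + L) := rfl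
    have hiff : (st.1 + PySem.List.pyGetD a ((i : Int) + (L : Int)) 0
        = st.2.1 + PySem.List.pyGetD b ((i : Int) + (L : Int)) 0)
        ↔ pc a b (i + L + 1) = pc a b i := by omega
    have hix : pc a b (i + (L + 1)) = pc a b (i + L + 1) := rfl
    by_cases hc : pc a b (i + L + 1) = pc a b i
    · rw [if_pos (hiff.mpr hc), if_pos (show decide (pc a b (i + L + 1) = pc a b i) = true from decide_eq_true hc)]
      simp only [List.map_cons, List.map_nil, List.foldl_cons, List.foldl_nil]
      constructor
      · rw [h1]; congr 1; omega
      · omega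
    · rw [if_neg (fun h => hc (hiff.mp h)),
        if_neg (show ¬ (decide (pc a b (i + L + 1) = pc a b i) = true) by simpa using hc)]
      simp only [List.map_nil, List.foldl_nil]
      exact ⟨h1, by omega⟩

def candsA (a b : List Int) (m i : Nat) : List Int :=
  ((List.range (m - i)).filter (fun u => decide (pc a b (i + u + 1) = pc a b i))).map
    (fun (u : Nat) => ((u : Int) + 1))

lemma contSeq_eq (a b : List Int) (n : Int) :
    contSeq a b n = (List.range n.toNat).foldl (fun r i => (candsA a b n.toNat i).foldl max r) 0 := by
  unfold contSeq
  rcases le_or_gt n 0 with hn | hn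
  · rw [PySem.List.pyRange_one_eq_nil hn, Int.toNat_of_nonpos hn]
    rfl
  · rw [PySem.List.pyRange_one 0 n, List.foldl_map]
    rw [show ((List.range (n - 0).toNat)) = List.range n.toNat by norm_num]
    apply PySem.List.foldl_congr_mem
    intro acc i hi
    rw [List.mem_range] at hi
    rw [zero_add, PySem.List.pyRange_one (i : Int) n, List.foldl_map]
    have hlen : ((n - (i : Int)).toNat) = n.toNat - i := by omega
    rw [hlen]
    have := (A_inner a b i (n.toNat - i) acc).1
    unfold candsA
    exact this

def fIdx (a b : List Int) (k : Nat) : Nat :=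
  Nat.find (p := fun p => pc a b p = pc a b k) ⟨k, rfl⟩

lemma fIdx_le (a b : List Int) (k : Nat) : fIdx a b k ≤ k :=
  Nat.find_min' _ rfl

lemma pc_fIdx (a b : List Int) (k : Nat) : pc a b (fIdx a b k) = pc a b k :=
  Nat.find_spec (p := fun p => pc a b p = pc a b k) ⟨k, rfl⟩

lemma fIdx_min (a b : List Int) (k p : Nat) (h : pc a b p = pc a b k) : fIdx a b k ≤ p :=
  Nat.find_min' _ h

lemma fIdx_congr (a b : List Int) (j k : Nat) (h : pc a b j = pc a b k) :
    fIdx a b j = fIdx a b k :=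
  le_antisymm (fIdx_min a b j _ (h ▸ pc_fIdx a b k)) (fIdx_min a b k _ (h ▸ pc_fIdx a b j))

-- running maximum of span-to-first-occurrence, B's result shape
def MB (a b : List Int) (t : Nat) : Int :=
  (List.range t).foldl (fun r (u : Nat) => max r (((u : Int) + 1) - ((fIdx a b (u + 1) : Nat) : Int))) 0

lemma MB_nonneg (a b : List Int) (t : Nat) : 0 ≤ MB a b t := by
  unfold MB
  exact (PySem.List.le_foldl_max_int (List.range t)
    (fun (u : Nat) => ((u : Int) + 1) - ((fIdx a b (u + 1) : Nat) : Int)) 0).1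

lemma B_loop (a b : List Int) : ∀ (t : Nat),
    ((List.range t).foldl
      (fun (st : Int × Int × PySem.Dict Int Int) (u : Nat) =>
        let diff := st.2.1 + (PySem.List.pyGetD a (u : Int) 0 - PySem.List.pyGetD b (u : Int) 0)
        if st.2.2.contains diff then
          (max st.1 ((u : Int) - st.2.2.getD diff 0), diff, st.2.2)
        else
          (st.1, diff, st.2.2.insert diff (u : Int)))
      (0, 0, PySem.Dict.empty.insert 0 (-1))).2.1 = pc a b t
  ∧ (∀ v : Int,
      ((List.range t).foldl
      (fun (st : Int × Int × PySem.Dict Int Int) (u : Nat) =>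
        let diff := st.2.1 + (PySem.List.pyGetD a (u : Int) 0 - PySem.List.pyGetD b (u : Int) 0)
        if st.2.2.contains diff then
          (max st.1 ((u : Int) - st.2.2.getD diff 0), diff, st.2.2)
        else
          (st.1, diff, st.2.2.insert diff (u : Int)))
      (0, 0, PySem.Dict.empty.insert 0 (-1))).2.2.contains v = true ↔ ∃ p, p ≤ t ∧ pc a b p = v)
  ∧ (∀ k : Nat, k ≤ t →
      ((List.range t).foldl
      (fun (st : Int × Int × PySem.Dict Int Int) (u : Nat) =>
        let diff := st.2.1 + (PySem.List.pyGetD a (u : Int) 0 - PySem.List.pyGetD b (u : Int) 0)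
        if st.2.2.contains diff then
          (max st.1 ((u : Int) - st.2.2.getD diff 0), diff, st.2.2)
        else
          (st.1, diff, st.2.2.insert diff (u : Int)))
      (0, 0, PySem.Dict.empty.insert 0 (-1))).2.2.getD (pc a b k) 0 = ((fIdx a b k : Nat) : Int) - 1)
  ∧ ((List.range t).foldl
      (fun (st : Int × Int × PySem.Dict Int Int) (u : Nat) =>
        let diff := st.2.1 + (PySem.List.pyGetD a (u : Int) 0 - PySem.List.pyGetD b (u : Int) 0)
        if st.2.2.contains diff then
          (max st.1 ((u : Int) - st.2.2.getD diff 0), diff, st.2.2)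
        else
          (st.1, diff, st.2.2.insert diff (u : Int)))
      (0, 0, PySem.Dict.empty.insert 0 (-1))).1 = MB a b t := by
  intro t
  induction t with
  | zero =>
    refine ⟨rfl, ?_, ?_, rfl⟩
    · intro v
      simp only [List.range_zero, List.foldl_nil, PySem.Dict.contains_insert,
        PySem.Dict.contains_empty, Bool.or_false]
      constructor
      · intro h
        exact ⟨0, le_refl 0, by simpa using (eq_of_beq h).symm⟩
      · rintro ⟨p, hp, hv⟩
        interval_cases p
        simp [← hv, pc]
    · intro k hk
      interval_cases k
      have hf : fIdx a b 0 = 0 := Nat.le_zero.mp (fIdx_le a b 0)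
      simp [pc, hf, PySem.Dict.getD_insert_self]
  | succ t ih =>
    obtain ⟨h1, h2, h3, h4⟩ := ih
    simp only [List.range_succ, List.foldl_append, List.foldl_cons, List.foldl_nil]
    set st := ((List.range t).foldl
      (fun (st : Int × Int × PySem.Dict Int Int) (u : Nat) =>
        let diff := st.2.1 + (PySem.List.pyGetD a (u : Int) 0 - PySem.List.pyGetD b (u : Int) 0)
        if st.2.2.contains diff then
          (max st.1 ((u : Int) - st.2.2.getD diff 0), diff, st.2.2)
        else
          (st.1, diff, st.2.2.insert diff (u : Int)))
      (0, 0, PySem.Dict.empty.insert 0 (-1))) with hst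
    have hdiff : st.2.1 + (PySem.List.pyGetD a (t : Int) 0 - PySem.List.pyGetD b (t : Int) 0)
        = pc a b (t + 1) := by rw [h1]; rfl
    rw [hdiff]
    by_cases hc : ∃ p, p ≤ t ∧ pc a b p = pc a b (t + 1)
    · have hgd : st.2.2.getD (pc a b (t + 1)) 0 = ((fIdx a b (t + 1) : Nat) : Int) - 1 := by
        obtain ⟨p, hpt, hpv⟩ := hc
        rw [← hpv, h3 p hpt, fIdx_congr a b p (t + 1) hpv]
      rw [if_pos (h2 _ |>.mpr hc)]
      refine ⟨rfl, ?_, ?_, ?_⟩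
      · intro v
        rw [h2 v]
        constructor
        · rintro ⟨p, hp, hv⟩; exact ⟨p, Nat.le_succ_of_le hp, hv⟩
        · rintro ⟨p, hp, hv⟩
          rcases Nat.lt_or_ge p (t + 1) with h | h
          · exact ⟨p, Nat.lt_succ_iff.mp h, hv⟩
          · have : p = t + 1 := le_antisymm hp h
            subst this
            obtain ⟨q, hq, hqv⟩ := hc
            exact ⟨q, hq, hv ▸ hqv⟩
      · intro k hk
        rcases Nat.lt_or_ge k (t + 1) with h | h
        · exact h3 k (Nat.lt_succ_iff.mp h)
        · have : k = t + 1 := le_antisymm hk h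
          subst this
          exact hgd
      · rw [hgd, h4]
        have : MB a b (t + 1)
            = max (MB a b t) (((t : Int) + 1) - ((fIdx a b (t + 1) : Nat) : Int)) := by
          unfold MB
          rw [List.range_succ, List.foldl_append, List.foldl_cons, List.foldl_nil]
        rw [this]
        omega
    · have hcb : ¬ (st.2.2.contains (pc a b (t + 1)) = true) := fun h => hc ((h2 _).mp h)
      rw [if_neg hcb]
      have hft : fIdx a b (t + 1) = t + 1 := by
        rcases Nat.lt_or_ge (fIdx a b (t + 1)) (t + 1) with h | h
        · exact absurd ⟨fIdx a b (t + 1), Nat.lt_succ_iff.mp h, pc_fIdx a b (t + 1)⟩ hc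
        · exact le_antisymm (fIdx_le a b (t + 1)) h
      refine ⟨rfl, ?_, ?_, ?_⟩
      · intro v
        rw [PySem.Dict.contains_insert]
        by_cases hv : v = pc a b (t + 1)
        · subst hv
          simp only [BEq.rfl, Bool.true_or, true_iff]
          exact ⟨t + 1, le_refl _, rfl⟩
        · have : (v == pc a b (t + 1)) = false := beq_false_of_ne hv
          rw [this, Bool.false_or, h2 v]
          constructor
          · rintro ⟨p, hp, hpv⟩; exact ⟨p, Nat.le_succ_of_le hp, hpv⟩
          · rintro ⟨p, hp, hpv⟩
            rcases Nat.lt_or_ge p (t + 1) with h | h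
            · exact ⟨p, Nat.lt_succ_iff.mp h, hpv⟩
            · have : p = t + 1 := le_antisymm hp h
              subst this
              exact absurd hpv.symm hv
      · intro k hk
        rcases Nat.lt_or_ge k (t + 1) with h | h
        · have hk' : k ≤ t := Nat.lt_succ_iff.mp h
          have hne : pc a b k ≠ pc a b (t + 1) := fun he => hc ⟨k, hk', he⟩
          show (st.2.2.insert (pc a b (t + 1)) (t : Int)).getD (pc a b k) 0 = _
          rw [PySem.Dict.getD_insert, if_neg hne, h3 k hk']
        · have : k = t + 1 := le_antisymm hk h
          subst this
          show (st.2.2.insert (pc a b (t + 1 + 1 - 1)) (t : Int)).getD (pc a b (t + 1)) 0 = _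
          rw [show t + 1 + 1 - 1 = t + 1 from rfl, PySem.Dict.getD_insert_self, hft]
          omega
      · rw [h4]
        have : MB a b (t + 1)
            = max (MB a b t) (((t : Int) + 1) - ((fIdx a b (t + 1) : Nat) : Int)) := by
          unfold MB
          rw [List.range_succ, List.foldl_append, List.foldl_cons, List.foldl_nil]
        rw [this, hft]
        have h0 : ((t : Int) + 1) - ((t + 1 : Nat) : Int) = 0 := by push_cast; ring
        rw [h0]
        exact (max_eq_left (MB_nonneg a b t)).symm

lemma contSeq_alt_eq (a b : List Int) (n : Int) : contSeq_alt a b n = MB a b n.toNat := by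
  unfold contSeq_alt
  rcases le_or_gt n 0 with hn | hn
  · rw [PySem.List.pyRange_one_eq_nil hn, Int.toNat_of_nonpos hn]
    rfl
  · rw [PySem.List.pyRange_one 0 n, List.foldl_map]
    simp only [zero_add]
    rw [show ((n - 0).toNat) = n.toNat by norm_num]
    exact (B_loop a b n.toNat).2.2.2

lemma foldl_foldl_max (f : Nat → List Int) (l : List Nat) (init : Int) :
    l.foldl (fun r i => (f i).foldl max r) init = (l.flatMap f).foldl max init := by
  induction l generalizing init with
  | nil => rfl
  | cons x t ih => simp [List.foldl_append, ih]

lemma main_max (a b : List Int) (m : Nat) :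
    (List.range m).foldl (fun r i => (candsA a b m i).foldl max r) 0 = MB a b m := by
  rw [foldl_foldl_max]
  have hMB : MB a b m
      = ((List.range m).map
          (fun (u : Nat) => ((u : Int) + 1) - ((fIdx a b (u + 1) : Nat) : Int))).foldl max 0 := by
    unfold MB
    rw [List.foldl_map]
  apply le_antisymm
  · rcases PySem.List.foldl_max_mem ((List.range m).flatMap (candsA a b m)) 0 with h | h
    · rw [h, hMB]
      exact (PySem.List.le_foldl_max _ 0).1
    · obtain ⟨i, hi, hx⟩ := List.mem_flatMap.mp h
      rw [List.mem_range] at hi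
      obtain ⟨u, hu, hval⟩ := List.mem_map.mp hx
      obtain ⟨hur, hcond⟩ := List.mem_filter.mp hu
      rw [List.mem_range] at hur
      have hcnd : pc a b (i + u + 1) = pc a b i := of_decide_eq_true hcond
      have hfle : fIdx a b (i + u + 1) ≤ i := fIdx_min a b (i + u + 1) i hcnd.symm
      have hmem : ((((i + u : Nat) : Int) + 1) - ((fIdx a b (i + u + 1) : Nat) : Int))
          ∈ (List.range m).map
            (fun (u : Nat) => ((u : Int) + 1) - ((fIdx a b (u + 1) : Nat) : Int)) :=
        List.mem_map.mpr ⟨i + u, List.mem_range.mpr (by omega), rfl⟩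
      have hb := (PySem.List.le_foldl_max _ 0).2 _ hmem
      rw [hMB, ← hval]
      refine le_trans ?_ hb
      push_cast
      omega
  · rcases PySem.List.foldl_max_mem ((List.range m).map
        (fun (u : Nat) => ((u : Int) + 1) - ((fIdx a b (u + 1) : Nat) : Int))) 0 with h | h
    · rw [hMB, h]
      exact (PySem.List.le_foldl_max _ 0).1
    · rw [hMB]
      obtain ⟨u', hu', hval⟩ := List.mem_map.mp h
      rw [List.mem_range] at hu'
      by_cases hfi : fIdx a b (u' + 1) = u' + 1
      · rw [← hval, hfi]
        have : ((u' : Int) + 1) - (((u' + 1 : Nat) : Nat) : Int) = 0 := by push_cast; ring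
        rw [this]
        exact (PySem.List.le_foldl_max _ 0).1
      · have hle : fIdx a b (u' + 1) ≤ u' :=
          Nat.lt_succ_iff.mp (lt_of_le_of_ne (fIdx_le a b (u' + 1)) hfi)
        set i := fIdx a b (u' + 1) with hi
        have hpc : pc a b (i + (u' - i) + 1) = pc a b i := by
          rw [show i + (u' - i) + 1 = u' + 1 by omega]
          exact (pc_fIdx a b (u' + 1)).symm
        have hmem : (((u' - i : Nat) : Int) + 1) ∈ (List.range m).flatMap (candsA a b m) := by
          refine List.mem_flatMap.mpr ⟨i, List.mem_range.mpr (by omega), ?_⟩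
          exact List.mem_map.mpr ⟨u' - i,
            List.mem_filter.mpr ⟨List.mem_range.mpr (by omega), decide_eq_true hpc⟩, rfl⟩
        have hb := (PySem.List.le_foldl_max _ 0).2 _ hmem
        rw [← hval]
        refine le_trans ?_ hb
        omega

-- ===== VERDICT (by name: the statement is the Claim_ definition above) =====
theorem contSeq_spec : Claim_equal_contSeq := by
  intro a b n _ _
  show contSeq a b n = contSeq_alt a b n
  rw [contSeq_eq, contSeq_alt_eq]
  exact main_max a b n.toNat
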